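-- pv_equiv track=rewrite | github.com/yooatom2200/Coding_Study | programmers_짝지어제거하기.py | solution
-- ===== SOURCE A (Python) =====
-- def solution(s):
--     s_split = list(s)
--     idx = 0
--     answer = 0
--     while s_split:
--         if idx >= len(s_split) - 1:
--             break
--
--         a = s_split[idx]
--         if s_split[idx] == s_split[idx+1]:
--             s_split.pop(idx)
--             s_split.pop(idx)
--             idx = 0
--         else:
--             idx += 1
--
--     if len(s_split) == 0:
--         answer = 1
--
--     return answer
-- ===== SOURCE B (Python) =====
-- def solution(s):
--     stack = []
--     for c in s:
--         if stack and stack[-1] == c: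
--             stack.pop()
--         else:
--             stack.append(c)
--     return 1 if not stack else 0
-- ===== Notes on version B (the rewrite author's own statement) =====
-- stated objective: faster
-- what changed: Replaced the restart-from-0 scan with repeated pop(idx) removals by a single-pass stack that pops when the next char equals the top.
import Mathlib
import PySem

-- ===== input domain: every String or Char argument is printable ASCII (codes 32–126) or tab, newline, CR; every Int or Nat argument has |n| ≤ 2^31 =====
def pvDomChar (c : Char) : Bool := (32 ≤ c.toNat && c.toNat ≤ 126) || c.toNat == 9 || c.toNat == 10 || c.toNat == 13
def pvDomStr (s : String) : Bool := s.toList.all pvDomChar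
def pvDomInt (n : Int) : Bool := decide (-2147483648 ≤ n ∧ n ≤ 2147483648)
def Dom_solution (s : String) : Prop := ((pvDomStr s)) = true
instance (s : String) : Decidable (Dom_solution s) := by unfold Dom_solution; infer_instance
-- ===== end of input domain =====

-- B replaces A's O(n^2) restart-from-0 pair-removal scan by a single O(n) stack pass (faster).

-- ===== PORT A =====
-- A's while loop over (s_split, idx); idx starts at 0 and only ever grows or resets to 0,
-- so it is kept as a Nat. `pop(idx); pop(idx)` removes positions idx and idx+1, i.e.
-- take idx ++ drop (idx+2). The loop breaks when the list is empty or idx >= len-1,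
-- which (in Nat arithmetic as in Python int arithmetic) is exactly ¬ (idx+1 < len).
def loopA (l : List Char) (idx : Nat) : List Char :=
  if h : idx + 1 < l.length then
    if l[idx]'(Nat.lt_of_succ_lt h) = l[idx + 1]'h then
      loopA (l.take idx ++ l.drop (idx + 2)) 0
    else
      loopA l (idx + 1)
  else l
termination_by (l.length, l.length - idx)
decreasing_by
  · apply Prod.Lex.left
    have ht : (l.take idx).length = idx := by
      simp [List.length_take]; omega
    have hd : (l.drop (idx + 2)).length = l.length - (idx + 2) := by
      simp [List.length_drop]
    simp only [List.length_append, ht, hd]; omega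
  · apply Prod.Lex.right'
    · omega
    · omega

def solution (s : String) : Int :=
  let r := loopA s.toList 0
  if r.length = 0 then 1 else 0

-- ===== PORT B =====
def stkStep (st : List Char) (c : Char) : List Char :=
  match st with
  | t :: ts => if t = c then ts else c :: t :: ts
  | [] => [c]

def solution_alt (s : String) : Int :=
  if s.toList.foldl stkStep [] = [] then 1 else 0

-- ===== PRECONDITION & SPEC =====
def Spec_solution (s : String) (out : Int) : Prop := out = solution_alt s
instance (s : String) (out : Int) : Decidable (Spec_solution s out) := by unfold Spec_solution; infer_instance

-- ===== CLAIM (what is proved, stated in full; the proofs are below) =====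
def Claim_equal_solution : Prop := ∀ (s : String), Dom_solution s → Spec_solution s (solution s)

-- ===== LEMMAS AND PROOFS =====

-- the stack is always irreducible (no two adjacent equal chars)
theorem stkStep_irr {st : List Char} {c : Char} (h : st.IsChain (· ≠ ·)) :
    (stkStep st c).IsChain (· ≠ ·) := by
  cases st with
  | nil => simp [stkStep]
  | cons t ts =>
    by_cases htc : t = c
    · simpa [stkStep, htc] using h.tail
    · simpa [stkStep, htc, Ne.symm htc] using h

-- feeding the same char twice into an irreducible stack is a no-op
theorem stkStep_twice {st : List Char} (h : st.IsChain (· ≠ ·)) (c : Char) :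
    stkStep (stkStep st c) c = st := by
  cases st with
  | nil => simp [stkStep]
  | cons t ts =>
    by_cases htc : t = c
    · subst htc
      cases ts with
      | nil => simp [stkStep]
      | cons u us =>
        have htu : t ≠ u := (List.isChain_cons.mp h).1 u rfl
        simp [stkStep, Ne.symm htu]
    · simp [stkStep, htc]

-- removing an adjacent equal pair anywhere does not change the stack result
theorem run_cancel {c : Char} {v : List Char} (u : List Char) :
    ∀ st : List Char, st.IsChain (· ≠ ·) →
      (u ++ c :: c :: v).foldl stkStep st = (u ++ v).foldl stkStep st := by
  induction u with
  | nil =>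
    intro st h
    simp [List.foldl, stkStep_twice h c]
  | cons a u ih =>
    intro st h
    simpa [List.foldl] using ih (stkStep st a) (stkStep_irr h)

-- running an irreducible list on a compatible stack just reverses it onto the stack
theorem run_irr_eq : ∀ (l st : List Char), l.IsChain (· ≠ ·) →
    (∀ a b, st.head? = some a → l.head? = some b → a ≠ b) →
    l.foldl stkStep st = l.reverse ++ st := by
  intro l
  induction l with
  | nil => intro st _ _; simp
  | cons c l ih =>
    intro st hch hhd
    have hstep : stkStep st c = c :: st := by
      cases st with
      | nil => simp [stkStep]
      | cons a ts =>
        have : a ≠ c := hhd a c rfl rfl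
        simp [stkStep, this]
    have hhd' : ∀ a b, (c :: st).head? = some a → l.head? = some b → a ≠ b := by
      intro a b ha hb
      simp at ha; subst ha
      cases l with
      | nil => simp at hb
      | cons d l' =>
        simp at hb; subst hb
        exact (List.isChain_cons.mp hch).1 d rfl
    calc (c :: l).foldl stkStep st = l.foldl stkStep (c :: st) := by simp [List.foldl, hstep]
      _ = l.reverse ++ c :: st := ih (c :: st) hch.tail hhd'
      _ = (c :: l).reverse ++ st := by simp

-- main invariant of A's loop: the stack result is preserved, and the final list is irreducible
theorem loopA_main : ∀ (l : List Char) (idx : Nat),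
    (∀ j, j < idx → (h : j + 1 < l.length) → l[j] ≠ l[j + 1]) →
    (loopA l idx).foldl stkStep [] = l.foldl stkStep [] ∧
      (loopA l idx).IsChain (· ≠ ·) := by
  intro l idx
  induction l, idx using loopA.induct with
  | case1 l idx h heq ih =>
    -- pair found at idx: remove it
    intro _
    have hidx : idx < l.length := Nat.lt_of_succ_lt h
    have hdecomp : l = l.take idx ++ l[idx] :: l[idx + 1] :: l.drop (idx + 2) := by
      conv_lhs => rw [← List.take_append_drop idx l]
      congr 1
      rw [List.drop_eq_getElem_cons hidx, List.drop_eq_getElem_cons h]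
    have hrun : l.foldl stkStep ([] : List Char) =
        (l.take idx ++ l.drop (idx + 2)).foldl stkStep [] := by
      conv_lhs => rw [hdecomp]
      rw [← heq]
      exact run_cancel (l.take idx) [] (by simp)
    obtain ⟨h1, h2⟩ := ih (by intro j hj _; omega)
    rw [loopA, dif_pos h, if_pos heq]
    exact ⟨h1.trans hrun.symm, h2⟩
  | case2 l idx h heq ih =>
    -- no pair at idx: advance
    intro hinv
    obtain ⟨h1, h2⟩ := ih (by
      intro j hj hjl
      rcases Nat.lt_or_ge j idx with hj' | hj'
      · exact hinv j hj' hjl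
      · have : j = idx := by omega
        subst this; exact heq)
    rw [loopA, dif_pos h, if_neg heq]
    exact ⟨h1, h2⟩
  | case3 l idx h =>
    -- break: the whole list up to the end has been checked
    intro hinv
    rw [loopA, dif_neg h]
    refine ⟨rfl, ?_⟩
    rw [List.isChain_iff_getElem]
    intro i hi
    exact hinv i (by omega) hi

-- ===== VERDICT (by name: the statement is the Claim_ definition above) =====
theorem solution_spec : Claim_equal_solution := by
  unfold Claim_equal_solution
  intro s _
  unfold Spec_solution solution solution_alt
  obtain ⟨h1, h2⟩ := loopA_main s.toList 0 (by intro j hj _; omega)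
  have hrev : (loopA s.toList 0).foldl stkStep [] = (loopA s.toList 0).reverse := by
    simpa using run_irr_eq (loopA s.toList 0) [] h2 (by intro a b ha _; simp at ha)
  have hkey : s.toList.foldl stkStep [] = (loopA s.toList 0).reverse := by
    rw [← h1, hrev]
  rw [hkey]
  by_cases hemp : loopA s.toList 0 = []
  · simp [hemp]
  · have : (loopA s.toList 0).length ≠ 0 := by simpa using hemp
    simp [this, List.reverse_eq_nil_iff, hemp]
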